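-- pv_equiv track=rewrite | github.com/devYuMinKim/Coding_Test_with_JavaScript | 20220803/모범답안/20220803_10.js/friend.py | bfs
-- ===== SOURCE A (Python) =====
-- def bfs(n, start, graph):
--     que = []
--     que_front = 0
--
--     dist = [-1] * n
--
--     que.append(start)
--     dist[start] = 0
--
--     while que_front < len(que):
--         here = que[que_front]
--         que_front += 1
--
--         for i in range(n):
--             if graph[here][i] == 0 or dist[i] != -1:
--                 continue
--
--             dist[i] = dist[here] + 1
--
--             if dist[i] < 2:
--                 que.append(i)
--
--     return dist.count(2)
-- ===== SOURCE B (Python) =====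
-- def bfs(n, start, graph):
--     # two explicit level passes instead of a BFS queue + distance array:
--     # 'seen' marks start and its direct friends; 'second' collects the distance-2 nodes
--     seen = [False] * n
--     seen[start] = True
--     direct = [i for i in range(n) if graph[start][i] != 0 and not seen[i]]
--     for d in direct:
--         seen[d] = True
--     second = set()
--     for d in direct:
--         row = graph[d]
--         for j in range(n):
--             if row[j] != 0 and not seen[j]:
--                 second.add(j)
--     return len(second)
-- ===== Notes on version B (the rewrite author's own statement) =====
-- stated objective: simpler
-- what changed: Replaces the BFS queue + dist distance array and the final dist.count(2) by two explicit level passes: a boolean seen mask marks start and its distance-1 friends, then one nested pass over the direct friends' rows collects the unseen neighbours into a set whose size is returned.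
-- outside the precondition, e.g. on bfs(2, -1, [[0, 1], [1, 0]]): A returns 0, B returns 0
import Mathlib
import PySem

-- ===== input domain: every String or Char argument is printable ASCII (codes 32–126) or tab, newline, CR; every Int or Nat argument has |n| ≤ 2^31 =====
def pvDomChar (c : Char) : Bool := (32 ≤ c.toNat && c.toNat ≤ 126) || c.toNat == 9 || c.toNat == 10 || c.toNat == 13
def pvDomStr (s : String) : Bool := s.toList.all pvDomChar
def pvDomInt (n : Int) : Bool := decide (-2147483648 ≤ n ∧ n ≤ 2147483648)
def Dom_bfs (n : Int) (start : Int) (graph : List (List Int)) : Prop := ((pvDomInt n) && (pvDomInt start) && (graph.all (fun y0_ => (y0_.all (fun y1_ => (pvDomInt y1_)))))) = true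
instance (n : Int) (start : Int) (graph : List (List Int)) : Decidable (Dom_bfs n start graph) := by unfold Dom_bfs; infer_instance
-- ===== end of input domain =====

-- B replaces A's BFS queue + dist array by two explicit level passes (distance-1 list, distance-2 set); same O(n^2) cost, simpler decomposition.


-- ===== PORT A =====
-- body of A's while loop: 'for i in range(n): if graph[here][i] == 0 or dist[i] != -1: continue;
-- dist[i] = dist[here] + 1; if dist[i] < 2: que.append(i)'.  State is the pair (dist, que);
-- graph[here][i] / dist[i] / dist[here] are in range on every access A makes under Pre_, so the pyGetD defaults are never used there.
def bfsInner (n : Int) (graph : List (List Int)) (here : Int) (st : List Int × List Int) : List Int × List Int :=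
  (PySem.List.pyRange 0 n 1).foldl (fun st i =>
    if PySem.List.pyGetD (PySem.List.pyGetD graph here []) i 0 = 0 ∨ PySem.List.pyGetD st.1 i 0 ≠ -1 then
      st
    else
      let dist' := PySem.List.pySetD st.1 i (PySem.List.pyGetD st.1 here 0 + 1)
      if PySem.List.pyGetD dist' i 0 < 2 then (dist', st.2 ++ [i]) else (dist', st.2)) st

-- 'while que_front < len(que)': ported with fuel bounding the number of iterations; the queue holds
-- each node at most once, so n.toNat + 1 iterations always suffice under Pre_ (the proof below steps through them)
def bfsLoop (n : Int) (graph : List (List Int)) (fuel : Nat) (que : List Int) (queFront : Nat) (dist : List Int) : List Int :=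
  match fuel with
  | 0 => dist
  | f + 1 =>
    if queFront < que.length then
      let here := PySem.List.pyGetD que (queFront : Int) 0   -- here = que[que_front]
      let st := bfsInner n graph here (dist, que)
      bfsLoop n graph f st.2 (queFront + 1) st.1
    else dist

def bfs (n : Int) (start : Int) (graph : List (List Int)) : Int :=
  let que : List Int := [] ++ [start]                    -- que = []; que.append(start)
  -- dist = [-1] * n; dist[start] = 0  (IndexError when start is out of range: excluded by Pre_)
  let dist : List Int := PySem.List.pySetD (List.replicate n.toNat (-1)) start 0
  let final := bfsLoop n graph (n.toNat + 1) que 0 dist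
  ((final.count 2 : Nat) : Int)                          -- return dist.count(2)

-- ===== PORT B =====
def bfs_alt (n : Int) (start : Int) (graph : List (List Int)) : Int :=
  -- seen = [False] * n; seen[start] = True  (IndexError when start is out of range: excluded by Pre_)
  let seen : List Bool := PySem.List.pySetD (List.replicate n.toNat false) start true
  -- direct = [i for i in range(n) if graph[start][i] != 0 and not seen[i]]
  let direct : List Int := (PySem.List.pyRange 0 n 1).filter
    (fun i => decide (PySem.List.pyGetD (PySem.List.pyGetD graph start []) i 0 ≠ 0 ∧
      PySem.List.pyGetD seen i false = false))
  -- for d in direct: seen[d] = True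
  let seen1 : List Bool := direct.foldl (fun s d => PySem.List.pySetD s d true) seen
  let second : PySem.Set Int := direct.foldl (fun second d =>   -- for d in direct:
    let row := PySem.List.pyGetD graph d []                     --   row = graph[d]
    (PySem.List.pyRange 0 n 1).foldl (fun second j =>           --   for j in range(n):
      if PySem.List.pyGetD row j 0 ≠ 0 ∧ PySem.List.pyGetD seen1 j false = false then
        PySem.Set.add second j
      else second) second) PySem.Set.empty
  PySem.Set.len second                                          -- return len(second)

-- ===== PRECONDITION & SPEC =====
-- Pre_ = the intended calls A's search completes: 0 ≤ start < n, row 'start' exists with length ≥ n, and the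
-- row of every direct friend of start exists with length ≥ n (exactly the cells A reads).  Outside it A raises
-- IndexError, except for a negative start, where both programs return a value via Python's negative-index
-- wraparound — an accidental domain the claim does not cover.
def Pre_bfs (n : Int) (start : Int) (graph : List (List Int)) : Prop :=
  0 ≤ start ∧ start < n ∧ start.toNat < graph.length ∧
    n ≤ ((graph.getD start.toNat []).length : Int) ∧
    ∀ k ∈ List.range n.toNat, (graph.getD start.toNat []).getD k 0 ≠ 0 →
      k < graph.length ∧ n ≤ ((graph.getD k []).length : Int)
instance (n : Int) (start : Int) (graph : List (List Int)) : Decidable (Pre_bfs n start graph) := by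
  unfold Pre_bfs; infer_instance

def pvWitness_bfs : Int × Int × List (List Int) := (2, 0, [[0, 1], [1, 0]])

def Spec_bfs (n : Int) (start : Int) (graph : List (List Int)) (out : Int) : Prop := out = bfs_alt n start graph
instance (n : Int) (start : Int) (graph : List (List Int)) (out : Int) : Decidable (Spec_bfs n start graph out) := by unfold Spec_bfs; infer_instance

-- ===== CLAIM (what is proved, stated in full; the proofs are below) =====
def Claim_equal_bfs : Prop := ∀ (n : Int) (start : Int) (graph : List (List Int)), Dom_bfs n start graph → Pre_bfs n start graph → Spec_bfs n start graph (bfs n start graph)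

-- ===== LEMMAS AND PROOFS =====

-- index helpers ------------------------------------------------------------

theorem pvIdx_arg (len : Nat) (j : Int) (k : Nat) (h : PySem.List.pyIdx? len j = some k) : k < len := by
  unfold PySem.List.pyIdx? at h
  split_ifs at h <;> simp_all <;> omega

theorem pvGetD_set_any {α : Type} (dist : List α) (i : Int) (v d0 : α) (hi0 : 0 ≤ i) (hil : i < (dist.length : Int)) (j : Int) :
    PySem.List.pyGetD (PySem.List.pySetD dist i v) j d0 =
      if PySem.List.pyIdx? dist.length j = some i.toNat then v else PySem.List.pyGetD dist j d0 := by
  rw [PySem.List.pySetD_of_nonneg dist v hi0]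
  unfold PySem.List.pyGetD PySem.List.pyGet?
  rw [List.length_set]
  cases hk : PySem.List.pyIdx? dist.length j with
  | none => simp
  | some k =>
    have hklen := pvIdx_arg _ _ _ hk
    by_cases hki : k = i.toNat
    · subst hki
      simp [List.getElem?_set_self (by omega : i.toNat < dist.length)]
    · simp [hki, List.getElem?_set_ne (by omega : i.toNat ≠ k)]

theorem pvGetD_set {α : Type} (dist : List α) (i : Int) (v d0 : α) (hi0 : 0 ≤ i) (hil : i < (dist.length:Int)) (j : Int) (hj : 0 ≤ j) :
    PySem.List.pyGetD (PySem.List.pySetD dist i v) j d0 = if j = i then v else PySem.List.pyGetD dist j d0 := by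
  rw [pvGetD_set_any dist i v d0 hi0 hil j]
  unfold PySem.List.pyIdx?
  by_cases hjl : j < (dist.length : Int)
  · rw [if_pos hj, if_pos hjl]
    by_cases hji : j = i
    · simp [hji]
    · rw [if_neg hji, if_neg]
      simp only [Option.some.injEq]
      omega
  · rw [if_pos hj, if_neg hjl]
    rw [if_neg (by simp), if_neg (by omega)]

theorem pvGetD_set_pres (dist : List Int) (i v here c : Int) (hi0 : 0 ≤ i) (hil : i < (dist.length:Int))
    (hc : PySem.List.pyGetD dist here 0 = c) (hne : PySem.List.pyGetD dist i 0 ≠ c) :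
    PySem.List.pyGetD (PySem.List.pySetD dist i v) here 0 = c := by
  rw [pvGetD_set_any dist i v 0 hi0 hil here]
  split_ifs with h
  · exfalso
    apply hne
    rw [PySem.List.pyGetD_eq_getElem _ _ hi0 hil]
    rw [← hc]
    unfold PySem.List.pyGetD PySem.List.pyGet?
    rw [h]
    simp [List.getElem?_eq_getElem (by omega : i.toNat < dist.length)]
  · exact hc

-- A's inner for-loop, characterised ---------------------------------------

def pvG (graph : List (List Int)) (h i : Int) : Int :=
  PySem.List.pyGetD (PySem.List.pyGetD graph h []) i 0

def pvStepA (graph : List (List Int)) (here : Int) : (List Int × List Int) → Int → (List Int × List Int) :=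
  fun st i =>
    if PySem.List.pyGetD (PySem.List.pyGetD graph here []) i 0 = 0 ∨ PySem.List.pyGetD st.1 i 0 ≠ -1 then
      st
    else
      let dist' := PySem.List.pySetD st.1 i (PySem.List.pyGetD st.1 here 0 + 1)
      if PySem.List.pyGetD dist' i 0 < 2 then (dist', st.2 ++ [i]) else (dist', st.2)

theorem bfsInner_eq (n : Int) (graph : List (List Int)) (here : Int) (st : List Int × List Int) :
    bfsInner n graph here st = (PySem.List.pyRange 0 n 1).foldl (pvStepA graph here) st := rfl

theorem pvInner (graph : List (List Int)) (here c : Int) (hc0 : 0 ≤ c)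
    (L : List Int) (dist que : List Int) (hnd : L.Nodup)
    (hL : ∀ i ∈ L, 0 ≤ i ∧ i < (dist.length : Int))
    (hc : PySem.List.pyGetD dist here 0 = c) :
    (L.foldl (pvStepA graph here) (dist, que)).1.length = dist.length ∧
    (∀ j : Int, 0 ≤ j →
      PySem.List.pyGetD (L.foldl (pvStepA graph here) (dist, que)).1 j 0 =
        if j ∈ L ∧ pvG graph here j ≠ 0 ∧ PySem.List.pyGetD dist j 0 = -1 then c + 1
        else PySem.List.pyGetD dist j 0) ∧
    (L.foldl (pvStepA graph here) (dist, que)).2 =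
      que ++ L.filter (fun i => decide (pvG graph here i ≠ 0 ∧ PySem.List.pyGetD dist i 0 = -1 ∧ c + 1 < 2)) := by
  induction L generalizing dist que with
  | nil => simp
  | cons i L ih =>
    obtain ⟨hi0, hil⟩ := hL i (by simp)
    have hnd' := hnd.of_cons
    have hmem : i ∉ L := (List.nodup_cons.1 hnd).1
    by_cases hg : pvG graph here i = 0 ∨ PySem.List.pyGetD dist i 0 ≠ -1
    · -- guard fires: 'continue'
      have hnot : ¬ (pvG graph here i ≠ 0 ∧ PySem.List.pyGetD dist i 0 = -1) := by
        rintro ⟨h2, h3⟩; rcases hg with h | h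
        · exact h2 h
        · exact h h3
      have hstep : pvStepA graph here (dist, que) i = (dist, que) := by
        simp only [pvStepA]; rw [if_pos]; exact hg
      rw [List.foldl_cons, hstep]
      obtain ⟨ih1, ih2, ih3⟩ := ih dist que hnd' (fun x hx => hL x (by simp [hx])) hc
      refine ⟨ih1, ?_, ?_⟩
      · intro j hj
        rw [ih2 j hj]
        by_cases hji : j = i
        · subst hji
          rw [if_neg (fun h => hnot ⟨h.2.1, h.2.2⟩), if_neg (fun h => hnot ⟨h.2.1, h.2.2⟩)]
        · by_cases hjL : j ∈ L
          · simp only [List.mem_cons, hjL, hji, or_true, false_or]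
          · simp only [List.mem_cons, hjL, hji, or_false, false_and, if_false]
      · rw [ih3, List.filter_cons]
        have hnot2 : ¬ (pvG graph here i ≠ 0 ∧ PySem.List.pyGetD dist i 0 = -1 ∧ c + 1 < 2) := by
          rintro ⟨h1, h2, -⟩; exact hnot ⟨h1, h2⟩
        rw [if_neg (by simpa using hnot2)]
    · push_neg at hg
      obtain ⟨hg1, hg2⟩ := hg
      have hval : PySem.List.pyGetD dist here 0 + 1 = c + 1 := by rw [hc]
      set dist' := PySem.List.pySetD dist i (PySem.List.pyGetD dist here 0 + 1) with hd'
      have hset : ∀ j : Int, 0 ≤ j →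
          PySem.List.pyGetD dist' j 0 = if j = i then c + 1 else PySem.List.pyGetD dist j 0 := by
        intro j hj; rw [hd', hval]; exact pvGetD_set dist i (c+1) 0 hi0 hil j hj
      have hlen' : dist'.length = dist.length := by
        rw [hd', PySem.List.pySetD_of_nonneg dist _ hi0]; simp
      have hdi : PySem.List.pyGetD dist' i 0 = c + 1 := by
        rw [hset i hi0, if_pos rfl]
      have hstep : pvStepA graph here (dist, que) i =
          (dist', if c + 1 < 2 then que ++ [i] else que) := by
        simp only [pvStepA]
        rw [if_neg (by push_neg; exact ⟨hg1, hg2⟩)]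
        simp only [← hd', hdi]
        split_ifs <;> rfl
      rw [List.foldl_cons, hstep]
      have hc' : PySem.List.pyGetD dist' here 0 = c := by
        rw [hd', hval]
        exact pvGetD_set_pres dist i (c+1) here c hi0 hil hc (by rw [hg2]; omega)
      obtain ⟨ih1, ih2, ih3⟩ := ih dist' (if c + 1 < 2 then que ++ [i] else que) hnd'
        (fun x hx => by rw [hlen']; exact hL x (by simp [hx])) hc'
      refine ⟨by rw [ih1, hlen'], ?_, ?_⟩
      · intro j hj
        rw [ih2 j hj]
        by_cases hji : j = i
        · subst hji
          rw [if_neg (by rintro ⟨hjL, -, -⟩; exact hmem hjL)]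
          rw [hset j hj, if_pos rfl, if_pos ⟨by simp, hg1, hg2⟩]
        · rw [hset j hj, if_neg hji]
          by_cases hjL : j ∈ L
          · simp only [List.mem_cons, hjL, hji, or_true, false_or]
          · simp only [List.mem_cons, hjL, hji, or_false, false_and, if_false]
      · rw [ih3]
        have hfeq : L.filter (fun x => decide (pvG graph here x ≠ 0 ∧ PySem.List.pyGetD dist' x 0 = -1 ∧ c + 1 < 2)) =
            L.filter (fun x => decide (pvG graph here x ≠ 0 ∧ PySem.List.pyGetD dist x 0 = -1 ∧ c + 1 < 2)) := by
          apply List.filter_congr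
          intro x hx
          have hx0 := (hL x (by simp [hx])).1
          have hxi : x ≠ i := fun h => hmem (h ▸ hx)
          rw [hset x hx0, if_neg hxi]
        rw [hfeq, List.filter_cons]
        by_cases h2 : c + 1 < 2
        · simp [h2, hg1, hg2]
        · simp [h2]

-- B's level sets -----------------------------------------------------------

def pvDirect (n : Int) (start : Int) (graph : List (List Int)) : List Int :=
  (PySem.List.pyRange 0 n 1).filter (fun i => decide (i ≠ start ∧ pvG graph start i ≠ 0))

def pvForm (n : Int) (start : Int) (graph : List (List Int)) (acc : List Int) : List Int :=
  (PySem.List.pyRange 0 n 1).map (fun j =>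
    if j = start then 0
    else if j ∈ pvDirect n start graph then 1
    else if j ∈ acc then 2 else -1)

def pvSeen0 (n : Int) (start : Int) : List Bool :=
  PySem.List.pySetD (List.replicate n.toNat false) start true

def pvDirectB (n : Int) (start : Int) (graph : List (List Int)) : List Int :=
  (PySem.List.pyRange 0 n 1).filter
    (fun i => decide (pvG graph start i ≠ 0 ∧ PySem.List.pyGetD (pvSeen0 n start) i false = false))

def pvSeen1 (n : Int) (start : Int) (graph : List (List Int)) : List Bool :=
  (pvDirectB n start graph).foldl (fun s d => PySem.List.pySetD s d true) (pvSeen0 n start)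

def pvStepB (n : Int) (start : Int) (graph : List (List Int)) (acc : PySem.Set Int) (d : Int) : PySem.Set Int :=
  (PySem.List.pyRange 0 n 1).foldl (fun s j =>
    if pvG graph d j ≠ 0 ∧ PySem.List.pyGetD (pvSeen1 n start graph) j false = false then
      PySem.Set.add s j
    else s) acc

theorem bfs_alt_eq (n start : Int) (graph : List (List Int)) :
    bfs_alt n start graph =
      PySem.Set.len ((pvDirectB n start graph).foldl (pvStepB n start graph) PySem.Set.empty) := rfl

theorem mem_pvDirect (n start : Int) (graph : List (List Int)) (j : Int) :
    j ∈ pvDirect n start graph ↔ (0 ≤ j ∧ j < n ∧ j ≠ start ∧ pvG graph start j ≠ 0) := by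
  simp [pvDirect, List.mem_filter, PySem.List.mem_pyRange_one]
  tauto

theorem length_pvSeen0 (n start : Int) (hs0 : 0 ≤ start) : (pvSeen0 n start).length = n.toNat := by
  unfold pvSeen0; rw [PySem.List.pySetD_of_nonneg _ _ hs0]; simp

theorem pvSeen0_getD (n start : Int) (hs0 : 0 ≤ start) (hsn : start < n) (j : Int)
    (hj0 : 0 ≤ j) (hjn : j < n) :
    PySem.List.pyGetD (pvSeen0 n start) j false = decide (j = start) := by
  unfold pvSeen0
  rw [pvGetD_set (List.replicate n.toNat false) start true false hs0 (by simp; omega) j hj0]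
  by_cases hjs : j = start
  · simp [hjs]
  · rw [if_neg hjs, PySem.List.pyGetD_eq_getElem _ _ hj0 (by simp; omega)]
    simp [hjs]

theorem pvDirectB_eq (n start : Int) (graph : List (List Int)) (hs0 : 0 ≤ start) (hsn : start < n) :
    pvDirectB n start graph = pvDirect n start graph := by
  unfold pvDirectB pvDirect
  apply List.filter_congr
  intro x hx
  rw [PySem.List.mem_pyRange_one] at hx
  rw [pvSeen0_getD n start hs0 hsn x hx.1 hx.2, decide_eq_decide]
  simp only [decide_eq_false_iff_not]
  tauto

theorem pvFoldSeen (D : List Int) :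
    ∀ (s : List Bool), (∀ d ∈ D, 0 ≤ d ∧ d < (s.length : Int)) →
      (D.foldl (fun s d => PySem.List.pySetD s d true) s).length = s.length ∧
      (∀ j : Int, 0 ≤ j →
        PySem.List.pyGetD (D.foldl (fun s d => PySem.List.pySetD s d true) s) j false =
          (PySem.List.pyGetD s j false || decide (j ∈ D))) := by
  induction D with
  | nil => intro s _; simp
  | cons d D ih =>
    intro s hb
    obtain ⟨hd0, hdl⟩ := hb d (by simp)
    have hlen : (PySem.List.pySetD s d true).length = s.length := by
      rw [PySem.List.pySetD_of_nonneg _ _ hd0]; simp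
    obtain ⟨ih1, ih2⟩ := ih (PySem.List.pySetD s d true)
      (fun x hx => by rw [hlen]; exact hb x (by simp [hx]))
    rw [List.foldl_cons]
    refine ⟨by rw [ih1, hlen], ?_⟩
    intro j hj0
    rw [ih2 j hj0, pvGetD_set s d true false hd0 hdl j hj0]
    by_cases hjd : j = d
    · simp [hjd]
    · simp [hjd, List.mem_cons]

theorem pvSeen1_getD (n start : Int) (graph : List (List Int)) (hs0 : 0 ≤ start) (hsn : start < n)
    (j : Int) (hj0 : 0 ≤ j) (hjn : j < n) :
    PySem.List.pyGetD (pvSeen1 n start graph) j false =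
      (decide (j = start) || decide (j ∈ pvDirect n start graph)) := by
  unfold pvSeen1
  rw [pvDirectB_eq n start graph hs0 hsn]
  obtain ⟨-, h2⟩ := pvFoldSeen (pvDirect n start graph) (pvSeen0 n start)
    (fun d hd => by
      obtain ⟨hd0, hdn, -, -⟩ := (mem_pvDirect n start graph d).1 hd
      rw [length_pvSeen0 n start hs0]
      exact ⟨hd0, by omega⟩)
  rw [h2 j hj0, pvSeen0_getD n start hs0 hsn j hj0 hjn]

theorem length_pvForm (n start : Int) (graph : List (List Int)) (acc : List Int) :
    (pvForm n start graph acc).length = n.toNat := by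
  simp [pvForm, PySem.List.length_pyRange_one]

theorem pvForm_getD (n start : Int) (graph : List (List Int)) (acc : List Int) (j : Int)
    (hj0 : 0 ≤ j) (hjn : j < n) :
    PySem.List.pyGetD (pvForm n start graph acc) j 0 =
      (if j = start then 0
       else if j ∈ pvDirect n start graph then 1
       else if j ∈ acc then 2 else -1) := by
  have hjl : j < ((pvForm n start graph acc).length : Int) := by
    rw [length_pvForm]; omega
  rw [PySem.List.pyGetD_eq_getElem _ _ hj0 hjl]
  unfold pvForm
  rw [List.getElem_map, PySem.List.getElem_pyRange_one]
  have h0j : 0 + ((j.toNat : Nat) : Int) = j := by omega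
  rw [h0j]

theorem pvMemFoldAdd (p : Int → Prop) [DecidablePred p] (L : List Int) :
    ∀ (s : PySem.Set Int) (j : Int),
      j ∈ L.foldl (fun s x => if p x then PySem.Set.add s x else s) s ↔ j ∈ s ∨ (j ∈ L ∧ p j) := by
  induction L with
  | nil => simp
  | cons x L ih =>
    intro s j
    rw [List.foldl_cons]
    by_cases hp : p x
    · rw [if_pos hp, ih]
      rw [PySem.Set.mem_add]
      constructor
      · rintro (⟨h | h⟩ | ⟨h1, h2⟩)
        · exact Or.inl h
        · subst h; exact Or.inr ⟨by simp, hp⟩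
        · exact Or.inr ⟨by simp [h1], h2⟩
      · rintro (h | ⟨h1, h2⟩)
        · exact Or.inl (Or.inl h)
        · rcases List.mem_cons.1 h1 with h | h
          · exact Or.inl (Or.inr h)
          · exact Or.inr ⟨h, h2⟩
    · rw [if_neg hp, ih]
      constructor
      · rintro (h | ⟨h1, h2⟩)
        · exact Or.inl h
        · exact Or.inr ⟨by simp [h1], h2⟩
      · rintro (h | ⟨h1, h2⟩)
        · exact Or.inl h
        · rcases List.mem_cons.1 h1 with h | h
          · subst h; exact absurd h2 hp
          · exact Or.inr ⟨h, h2⟩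

theorem pvNodupFoldAdd (p : Int → Prop) [DecidablePred p] (L : List Int) :
    ∀ (s : PySem.Set Int), s.Nodup →
      (L.foldl (fun s x => if p x then PySem.Set.add s x else s) s).Nodup := by
  induction L with
  | nil => intro s hs; simpa using hs
  | cons x L ih =>
    intro s hs
    rw [List.foldl_cons]
    by_cases hp : p x
    · rw [if_pos hp]; exact ih _ (PySem.Set.nodup_add s x hs)
    · rw [if_neg hp]; exact ih _ hs

theorem mem_pvStepB (n start : Int) (graph : List (List Int)) (hs0 : 0 ≤ start) (hsn : start < n)
    (acc : PySem.Set Int) (d : Int) (j : Int) :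
    j ∈ pvStepB n start graph acc d ↔
      j ∈ acc ∨ (0 ≤ j ∧ j < n ∧ pvG graph d j ≠ 0 ∧ j ≠ start ∧ j ∉ pvDirect n start graph) := by
  unfold pvStepB
  rw [pvMemFoldAdd (fun j => pvG graph d j ≠ 0 ∧ PySem.List.pyGetD (pvSeen1 n start graph) j false = false)]
  constructor
  · rintro (h | ⟨h1, h2, h3⟩)
    · exact Or.inl h
    · rw [PySem.List.mem_pyRange_one] at h1
      rw [pvSeen1_getD n start graph hs0 hsn j h1.1 h1.2] at h3
      simp only [Bool.or_eq_false_iff, decide_eq_false_iff_not] at h3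
      exact Or.inr ⟨h1.1, h1.2, h2, h3.1, h3.2⟩
  · rintro (h | ⟨h1, h2, h3, h4, h5⟩)
    · exact Or.inl h
    · refine Or.inr ⟨PySem.List.mem_pyRange_one.2 ⟨h1, h2⟩, h3, ?_⟩
      rw [pvSeen1_getD n start graph hs0 hsn j h1 h2]
      simp [h4, h5]

theorem nodup_pvStepB (n start : Int) (graph : List (List Int)) (acc : PySem.Set Int) (d : Int)
    (h : acc.Nodup) : (pvStepB n start graph acc d).Nodup := by
  unfold pvStepB
  exact pvNodupFoldAdd _ _ _ h

theorem mem_pvFoldB (n start : Int) (graph : List (List Int)) (hs0 : 0 ≤ start) (hsn : start < n) (ds : List Int) :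
    ∀ (acc : PySem.Set Int) (j : Int),
      j ∈ ds.foldl (pvStepB n start graph) acc ↔
        j ∈ acc ∨ ∃ d ∈ ds, (0 ≤ j ∧ j < n ∧ pvG graph d j ≠ 0 ∧ j ≠ start ∧ j ∉ pvDirect n start graph) := by
  induction ds with
  | nil => simp
  | cons d ds ih =>
    intro acc j
    rw [List.foldl_cons, ih, mem_pvStepB n start graph hs0 hsn]
    constructor
    · rintro ((h | h) | ⟨d', hd', h⟩)
      · exact Or.inl h
      · exact Or.inr ⟨d, by simp, h⟩
      · exact Or.inr ⟨d', by simp [hd'], h⟩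
    · rintro (h | ⟨d', hd', h⟩)
      · exact Or.inl (Or.inl h)
      · rcases List.mem_cons.1 hd' with h' | h'
        · subst h'; exact Or.inl (Or.inr h)
        · exact Or.inr ⟨d', h', h⟩

theorem nodup_pvFoldB (n start : Int) (graph : List (List Int)) (ds : List Int) :
    ∀ (acc : PySem.Set Int), acc.Nodup → (ds.foldl (pvStepB n start graph) acc).Nodup := by
  induction ds with
  | nil => intro acc h; simpa using h
  | cons d ds ih =>
    intro acc h
    rw [List.foldl_cons]
    exact ih _ (nodup_pvStepB n start graph acc d h)

-- extensionality through pyGetD --------------------------------------------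

theorem pvExtGetD (l1 l2 : List Int) (hl : l1.length = l2.length)
    (h : ∀ j : Int, 0 ≤ j → j < (l1.length : Int) → PySem.List.pyGetD l1 j 0 = PySem.List.pyGetD l2 j 0) :
    l1 = l2 := by
  apply List.ext_getElem hl
  intro k h1 h2
  have hk := h k (by omega) (by omega)
  rw [PySem.List.pyGetD_eq_getElem _ _ (by omega : (0:Int) ≤ (k:Int)) (by omega),
      PySem.List.pyGetD_eq_getElem _ _ (by omega : (0:Int) ≤ (k:Int)) (by omega)] at hk
  simpa using hk

-- phase 1: processing 'start' turns dist0 into pvForm [] and the queue into start :: direct ------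

theorem pvDist0_getD (n start : Int) (hs0 : 0 ≤ start) (hsn : start < n) (j : Int)
    (hj0 : 0 ≤ j) (hjn : j < n) :
    PySem.List.pyGetD (PySem.List.pySetD (List.replicate n.toNat (-1)) start 0) j 0 =
      if j = start then 0 else -1 := by
  have hrl : ((List.replicate n.toNat (-1:Int)).length : Int) = n := by simp; omega
  rw [pvGetD_set (List.replicate n.toNat (-1)) start 0 0 hs0 (by omega) j hj0]
  by_cases hjs : j = start
  · simp [hjs]
  · rw [if_neg hjs, if_neg hjs, PySem.List.pyGetD_eq_getElem _ _ hj0 (by omega)]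
    simp

theorem pvDist0_len (n start : Int) (hs0 : 0 ≤ start) :
    (PySem.List.pySetD (List.replicate n.toNat (-1:Int)) start 0).length = n.toNat := by
  rw [PySem.List.pySetD_of_nonneg _ _ hs0]; simp

theorem pvPhase1 (n start : Int) (graph : List (List Int)) (hs0 : 0 ≤ start) (hsn : start < n) :
    bfsInner n graph start (PySem.List.pySetD (List.replicate n.toNat (-1)) start 0, [start]) =
      (pvForm n start graph [], start :: pvDirect n start graph) := by
  set dist0 := PySem.List.pySetD (List.replicate n.toNat (-1:Int)) start 0 with hd0
  have hlen : dist0.length = n.toNat := pvDist0_len n start hs0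
  have hgd : ∀ j : Int, 0 ≤ j → j < n → PySem.List.pyGetD dist0 j 0 = if j = start then 0 else -1 :=
    fun j hj0 hjn => pvDist0_getD n start hs0 hsn j hj0 hjn
  rw [bfsInner_eq]
  obtain ⟨h1, h2, h3⟩ := pvInner graph start 0 le_rfl (PySem.List.pyRange 0 n 1) dist0 [start]
    (PySem.List.nodup_pyRange_one 0 n)
    (fun i hi => by
      rw [PySem.List.mem_pyRange_one] at hi
      exact ⟨hi.1, by rw [hlen]; omega⟩)
    (by rw [hgd start hs0 hsn, if_pos rfl])
  refine Prod.ext ?_ ?_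
  · -- dist side
    show (_ : List Int) = pvForm n start graph []
    apply pvExtGetD _ _ (by rw [h1, hlen, length_pvForm])
    intro j hj0 hjl
    rw [h1, hlen] at hjl
    have hjn : j < n := by omega
    rw [h2 j hj0, pvForm_getD n start graph [] j hj0 hjn, hgd j hj0 hjn]
    by_cases hjs : j = start
    · rw [if_neg (by rintro ⟨-, -, h⟩; rw [if_pos hjs] at h; omega)]
      simp [hjs]
    · by_cases hdj : j ∈ pvDirect n start graph
      · have hg : pvG graph start j ≠ 0 := ((mem_pvDirect n start graph j).1 hdj).2.2.2
        rw [if_pos ⟨PySem.List.mem_pyRange_one.2 ⟨hj0, hjn⟩, hg, by rw [if_neg hjs]⟩,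
            if_neg hjs, if_pos hdj]
        omega
      · have hg : pvG graph start j = 0 := by
          by_contra hg
          exact hdj ((mem_pvDirect n start graph j).2 ⟨hj0, hjn, hjs, hg⟩)
        rw [if_neg (by rintro ⟨-, h, -⟩; exact h hg), if_neg hjs, if_neg hjs, if_neg hdj]
        simp
  · -- queue side
    show (_ : List Int) = start :: pvDirect n start graph
    rw [h3]
    have : (PySem.List.pyRange 0 n 1).filter
        (fun i => decide (pvG graph start i ≠ 0 ∧ PySem.List.pyGetD dist0 i 0 = -1 ∧ (0:Int) + 1 < 2)) =
        pvDirect n start graph := by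
      unfold pvDirect
      apply List.filter_congr
      intro x hx
      rw [PySem.List.mem_pyRange_one] at hx
      rw [hgd x hx.1 hx.2]
      simp only [decide_eq_decide]
      constructor
      · rintro ⟨h1', h2', -⟩
        refine ⟨?_, h1'⟩
        intro hxs; rw [if_pos hxs] at h2'; omega
      · rintro ⟨h1', h2'⟩
        exact ⟨h2', by rw [if_neg h1'], by omega⟩
    rw [this]
    rfl

-- phase 2: the remaining iterations process exactly the direct list, building B's second set -----

theorem bfsLoop_succ (n : Int) (graph : List (List Int)) (f : Nat) (que : List Int) (qf : Nat) (dist : List Int) :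
    bfsLoop n graph (f + 1) que qf dist =
      if qf < que.length then
        bfsLoop n graph f (bfsInner n graph (PySem.List.pyGetD que (qf : Int) 0) (dist, que)).2 (qf + 1)
          (bfsInner n graph (PySem.List.pyGetD que (qf : Int) 0) (dist, que)).1
      else dist := rfl

theorem pvStepDist (n start : Int) (graph : List (List Int)) (hs0 : 0 ≤ start) (hsn : start < n)
    (acc : List Int) (d : Int) (que0 : List Int)
    (hd : d ∈ pvDirect n start graph) :
    (PySem.List.pyRange 0 n 1).foldl (pvStepA graph d) (pvForm n start graph acc, que0) =
      (pvForm n start graph (pvStepB n start graph acc d), que0) := by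
  obtain ⟨hd0, hdn, hds, hdg⟩ := (mem_pvDirect n start graph d).1 hd
  have hc : PySem.List.pyGetD (pvForm n start graph acc) d 0 = 1 := by
    rw [pvForm_getD n start graph acc d hd0 hdn, if_neg hds, if_pos hd]
  obtain ⟨h1, h2, h3⟩ := pvInner graph d 1 (by omega) (PySem.List.pyRange 0 n 1)
    (pvForm n start graph acc) que0 (PySem.List.nodup_pyRange_one 0 n)
    (fun i hi => by
      rw [PySem.List.mem_pyRange_one] at hi
      refine ⟨hi.1, ?_⟩
      rw [length_pvForm]
      omega)
    hc
  refine Prod.ext ?_ ?_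
  · -- dist side
    apply pvExtGetD _ _ (by rw [h1, length_pvForm, length_pvForm])
    intro j hj0 hjl
    rw [h1, length_pvForm] at hjl
    have hjn : j < n := by omega
    rw [h2 j hj0, pvForm_getD n start graph acc j hj0 hjn,
        pvForm_getD n start graph _ j hj0 hjn]
    by_cases hjs : j = start
    · rw [if_neg (by rintro ⟨-, -, h⟩; rw [if_pos hjs] at h; omega)]
      simp [hjs]
    · by_cases hdj : j ∈ pvDirect n start graph
      · rw [if_neg (by rintro ⟨-, -, h⟩; rw [if_neg hjs, if_pos hdj] at h; omega),
            if_neg hjs, if_neg hjs, if_pos hdj, if_pos hdj]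
      · by_cases hja : j ∈ acc
        · rw [if_neg (by rintro ⟨-, -, h⟩; rw [if_neg hjs, if_neg hdj, if_pos hja] at h; omega),
              if_neg hjs, if_neg hjs, if_neg hdj, if_neg hdj, if_pos hja,
              if_pos ((mem_pvStepB n start graph hs0 hsn acc d j).2 (Or.inl hja))]
        · have hform : (if j = start then (0:Int)
              else if j ∈ pvDirect n start graph then 1
              else if j ∈ acc then 2 else -1) = -1 := by
            rw [if_neg hjs, if_neg hdj, if_neg hja]
          by_cases hgj : pvG graph d j ≠ 0
          · rw [if_pos ⟨PySem.List.mem_pyRange_one.2 ⟨hj0, hjn⟩, hgj, hform⟩,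
                if_neg hjs, if_neg hdj,
                if_pos ((mem_pvStepB n start graph hs0 hsn acc d j).2 (Or.inr ⟨hj0, hjn, hgj, hjs, hdj⟩))]
            omega
          · push_neg at hgj
            rw [if_neg (by rintro ⟨-, h, -⟩; exact h hgj), hform,
                if_neg hjs, if_neg hdj,
                if_neg (by
                  intro hmem
                  rcases (mem_pvStepB n start graph hs0 hsn acc d j).1 hmem with h | h
                  · exact hja h
                  · exact h.2.2.1 hgj)]
  · -- queue side: nothing is appended at distance 2
    rw [h3]
    have hnil : (PySem.List.pyRange 0 n 1).filter
        (fun i => decide (pvG graph d i ≠ 0 ∧ PySem.List.pyGetD (pvForm n start graph acc) i 0 = -1 ∧ (1:Int) + 1 < 2)) = [] := by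
      apply List.filter_eq_nil_iff.2
      intro a ha
      simp only [decide_eq_true_eq, not_and]
      intro _ _
      omega
    rw [hnil, List.append_nil]

theorem pvLoop2 (n start : Int) (graph : List (List Int)) (hs0 : 0 ≤ start) (hsn : start < n) :
    ∀ (ds : List Int) (f : Nat) (qf : Nat) (acc : List Int),
      ds.length ≤ f →
      (start :: pvDirect n start graph).drop qf = ds →
      (∀ d ∈ ds, d ∈ pvDirect n start graph) →
      bfsLoop n graph f (start :: pvDirect n start graph) qf (pvForm n start graph acc) =
        pvForm n start graph (ds.foldl (pvStepB n start graph) acc) := by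
  intro ds
  induction ds with
  | nil =>
    intro f qf acc _ hdrop _
    have hle : (start :: pvDirect n start graph).length ≤ qf := List.drop_eq_nil_iff.1 hdrop
    cases f with
    | zero => rfl
    | succ f => rw [bfsLoop_succ, if_neg (by omega)]; rfl
  | cons d ds ih =>
    intro f qf acc hf hdrop hds
    cases f with
    | zero => simp at hf
    | succ f =>
      have hql : qf < (start :: pvDirect n start graph).length := by
        by_contra h
        rw [List.drop_eq_nil_iff.2 (by omega)] at hdrop
        exact List.cons_ne_nil d ds hdrop.symm
      have hhere : PySem.List.pyGetD (start :: pvDirect n start graph) (qf : Int) 0 = d := by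
        rw [PySem.List.pyGetD_natCast]
        have h0 : (start :: pvDirect n start graph)[qf]? = some d := by
          have := List.getElem?_drop (xs := start :: pvDirect n start graph) (i := qf) (j := 0)
          rw [hdrop] at this
          simpa using this.symm
        simp [List.getD, h0]
      rw [bfsLoop_succ, if_pos hql, hhere, bfsInner_eq,
          pvStepDist n start graph hs0 hsn acc d (start :: pvDirect n start graph) (hds d (by simp))]
      have hdq : (start :: pvDirect n start graph).drop (qf + 1) = ds := by
        have h2' := List.drop_drop (i := 1) (j := qf) (l := start :: pvDirect n start graph)
        rw [hdrop] at h2'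
        simpa using h2'.symm
      rw [ih f (qf + 1) (pvStepB n start graph acc d) (by simpa using hf) hdq
        (fun x hx => hds x (by simp [hx]))]
      rfl

-- counting -----------------------------------------------------------------

theorem pvCountPOr (l : List Nat) (p q : Nat → Bool) (h : ∀ x ∈ l, ¬(p x = true ∧ q x = true)) :
    l.countP (fun x => p x || q x) = l.countP p + l.countP q := by
  induction l with
  | nil => simp
  | cons x l ih =>
    simp only [List.countP_cons]
    rw [ih (fun y hy => h y (by simp [hy]))]
    by_cases hp : p x = true
    · have hq : ¬ q x = true := fun hq => h x (by simp) ⟨hp, hq⟩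
      simp [hp, hq]; omega
    · by_cases hq : q x = true
      · simp [hp, hq]; omega
      · simp [hp, hq]

theorem pvCount (N : Nat) (S : List Int) (hnd : S.Nodup) (hb : ∀ x ∈ S, 0 ≤ x ∧ x < (N : Int)) :
    (List.range N).countP (fun (k : Nat) => decide ((k : Int) ∈ S)) = S.length := by
  induction S with
  | nil => simp
  | cons x S ih =>
    have hx := hb x (by simp)
    have hxS : x ∉ S := (List.nodup_cons.1 hnd).1
    have hcongr : (List.range N).countP (fun (k : Nat) => decide ((k : Int) ∈ x :: S)) =
        (List.range N).countP (fun (k : Nat) => decide ((k : Int) = x) || decide ((k : Int) ∈ S)) := by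
      apply List.countP_congr
      intro y hy
      simp [List.mem_cons]
    rw [hcongr, pvCountPOr _ _ _ (by
      intro y hy ⟨h1, h2⟩
      simp only [decide_eq_true_eq] at h1 h2
      exact hxS (h1 ▸ h2))]
    rw [ih hnd.of_cons (fun y hy => hb y (by simp [hy]))]
    have hone : (List.range N).countP (fun (k : Nat) => decide ((k : Int) = x)) = 1 := by
      have : (List.range N).countP (fun (k : Nat) => decide ((k : Int) = x)) =
          (List.range N).countP (fun (k : Nat) => k == x.toNat) := by
        apply List.countP_congr
        intro y hy
        simp only [decide_eq_true_eq, beq_iff_eq]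
        omega
      rw [this, ← List.count_eq_countP]
      exact List.count_eq_one_of_mem (List.nodup_range) (by
        rw [List.mem_range]; omega)
    rw [hone]
    simp only [List.length_cons]
    omega

theorem pvCountForm (n start : Int) (graph : List (List Int)) (accF : List Int) (hn : 0 ≤ n)
    (hnd : accF.Nodup)
    (hsub : ∀ x ∈ accF, 0 ≤ x ∧ x < n ∧ x ≠ start ∧ x ∉ pvDirect n start graph) :
    (((pvForm n start graph accF).count 2 : Nat) : Int) = PySem.Set.len accF := by
  have hmain : (pvForm n start graph accF).count 2 = accF.length := by
    rw [List.count_eq_countP]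
    unfold pvForm
    rw [List.countP_map, PySem.List.pyRange_one 0 n, List.countP_map]
    have hN : ((((n : Int) - 0).toNat : Nat) : Int) = n := by omega
    have hcongr : (List.range ((n - 0).toNat)).countP
        (((fun (v : Int) => v == 2) ∘ (fun j => if j = start then 0
          else if j ∈ pvDirect n start graph then 1
          else if j ∈ accF then 2 else -1)) ∘ (fun (k : Nat) => (0 : Int) + k)) =
        (List.range ((n - 0).toNat)).countP (fun (k : Nat) => decide ((k : Int) ∈ accF)) := by
      apply List.countP_congr
      intro k hk
      simp only [Function.comp_apply, beq_iff_eq, decide_eq_true_eq, zero_add]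
      by_cases hks : (k : Int) = start
      · rw [if_pos hks]
        constructor
        · omega
        · intro hmem; exact absurd hks (hsub _ hmem).2.2.1
      · rw [if_neg hks]
        by_cases hkd : (k : Int) ∈ pvDirect n start graph
        · rw [if_pos hkd]
          constructor
          · omega
          · intro hmem; exact absurd hkd (hsub _ hmem).2.2.2
        · rw [if_neg hkd]
          by_cases hka : (k : Int) ∈ accF
          · rw [if_pos hka]; simp [hka]
          · rw [if_neg hka]
            constructor
            · omega
            · intro hmem; exact absurd hmem hka
    rw [hcongr]
    exact pvCount _ accF hnd (fun x hx => ⟨(hsub x hx).1, by rw [hN]; exact (hsub x hx).2.1⟩)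
  rw [hmain]
  rfl

-- ===== VERDICT (by name: the statement is the Claim_ definition above) =====
theorem bfs_spec : Claim_equal_bfs := by
  intro n start graph _ hpre
  obtain ⟨hs0, hsn, -, -, -⟩ := hpre
  unfold Spec_bfs
  rw [bfs_alt_eq, pvDirectB_eq n start graph hs0 hsn]
  have hbfs : bfs n start graph =
      (((bfsLoop n graph (n.toNat + 1) [start] 0
          (PySem.List.pySetD (List.replicate n.toNat (-1)) start 0)).count 2 : Nat) : Int) := by
    simp [bfs]
  rw [hbfs, bfsLoop_succ, if_pos (by simp)]
  have hget : PySem.List.pyGetD [start] ((0 : Nat) : Int) 0 = start := by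
    norm_num [PySem.List.pyGetD_zero_cons]
  rw [hget, pvPhase1 n start graph hs0 hsn]
  have hDlen : (pvDirect n start graph).length ≤ n.toNat := by
    have h1 := List.length_filter_le
      (fun i => decide (i ≠ start ∧ pvG graph start i ≠ 0)) (PySem.List.pyRange 0 n 1)
    rw [PySem.List.length_pyRange_one] at h1
    unfold pvDirect
    omega
  rw [pvLoop2 n start graph hs0 hsn (pvDirect n start graph) n.toNat 1 [] hDlen (by simp)
    (fun d hd => hd)]
  have hchar : ∀ x ∈ (pvDirect n start graph).foldl (pvStepB n start graph) ([] : PySem.Set Int),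
      0 ≤ x ∧ x < n ∧ x ≠ start ∧ x ∉ pvDirect n start graph := by
    intro x hx
    rcases (mem_pvFoldB n start graph hs0 hsn (pvDirect n start graph) [] x).1 hx with h | ⟨d, -, h⟩
    · simp at h
    · exact ⟨h.1, h.2.1, h.2.2.2.1, h.2.2.2.2⟩
  have hnd : ((pvDirect n start graph).foldl (pvStepB n start graph) ([] : PySem.Set Int)).Nodup :=
    nodup_pvFoldB n start graph (pvDirect n start graph) [] List.nodup_nil
  exact pvCountForm n start graph _ (by omega) hnd hchar
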